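-- pv_equiv track=rewrite | github.com/haakofli/advent-of-code-2021 | day15/day15.py | expand_graph
-- ===== SOURCE A (Python) =====
-- def expand_graph(data):
--     temp_graph = []
--     expanded_horizontally = []
--     expanded_graph = []
--
--     for row in data:
--         new_row = []
--         for i in range(5):
--             for col in row:
--                 x = col + i
--                 if x > 9: x = x % 9
--                 new_row.append(x)
--         expanded_horizontally.append(new_row)
--
--     for i in range(5):
--         new_rows = []
--         for row in expanded_horizontally:
--             new_row = []
--             for col in row:
--                 x = col + i
--                 if x > 9: x = x % 9
--                 new_row.append(x)
--             new_rows.append(new_row)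
--         temp_graph.append(new_rows)
--
--     for row in temp_graph:
--         for y in row:
--             expanded_graph.append(y)
--
--     return expanded_graph
-- ===== SOURCE B (Python) =====
-- def _wrap(x):
--     return x % 9 if x > 9 else x
--
--
-- def expand_graph(data):
--     # Index-arithmetic construction: output row R pulls its source row and tile
--     # offsets back out of R and the column index C via divmod; no tile loops,
--     # no intermediate grids.
--     n = len(data)
--     out = []
--     for R in range(5 * n):
--         base = data[R % n]
--         m = len(base)
--         out.append([_wrap(_wrap(base[C % m] + C // m) + R // n) for C in range(5 * m)])
--     return out
-- ===== Notes on version B (the rewrite author's own statement) =====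
-- stated objective: alternative
-- what changed: Instead of A's three staged passes (horizontal expansion, vertical expansion into a nested temp grid, final flatten), B constructs each output row directly by index arithmetic: output row R and column C are mapped back to source cell data[R % n][C % m] and tile offsets R // n, C // m, so no intermediate grid is built or rescanned.
import Mathlib
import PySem

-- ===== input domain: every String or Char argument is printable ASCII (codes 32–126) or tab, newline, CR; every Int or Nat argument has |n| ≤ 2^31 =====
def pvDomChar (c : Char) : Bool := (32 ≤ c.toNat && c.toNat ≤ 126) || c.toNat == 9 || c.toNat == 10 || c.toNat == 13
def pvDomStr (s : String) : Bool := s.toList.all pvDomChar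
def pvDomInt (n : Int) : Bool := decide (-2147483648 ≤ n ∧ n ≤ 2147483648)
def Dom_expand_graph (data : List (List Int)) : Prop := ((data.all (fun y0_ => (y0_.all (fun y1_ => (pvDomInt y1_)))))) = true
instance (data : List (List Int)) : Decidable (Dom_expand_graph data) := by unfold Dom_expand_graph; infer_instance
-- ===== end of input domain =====

-- B replaces A's three staged passes (horizontal expand, vertical expand into a nested temp
-- grid, flatten) by a direct index-arithmetic construction: each output row/cell is computed
-- by mapping its output coordinates back to a source cell and tile offsets via // and %
-- (objective: alternative; same asymptotic cost, no intermediate grids).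


-- ===== PORT A =====
def expand_graph (data : List (List Int)) : List (List Int) :=
  let expanded_horizontally : List (List Int) :=
    data.foldl (fun eh row =>
      let new_row : List Int :=
        (PySem.List.pyRange 0 5 1).foldl (fun nr i =>
          row.foldl (fun nr col =>
            let x := col + i
            let x := if x > 9 then PySem.Int.mod x 9 else x
            nr ++ [x]) nr) []
      eh ++ [new_row]) []
  let temp_graph : List (List (List Int)) :=
    (PySem.List.pyRange 0 5 1).foldl (fun tg i =>
      let new_rows : List (List Int) :=
        expanded_horizontally.foldl (fun nrs row =>
          let new_row : List Int :=
            row.foldl (fun nr col =>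
              let x := col + i
              let x := if x > 9 then PySem.Int.mod x 9 else x
              nr ++ [x]) []
          nrs ++ [new_row]) []
      tg ++ [new_rows]) []
  temp_graph.foldl (fun eg rows => rows.foldl (fun eg y => eg ++ [y]) eg) []

-- ===== PORT B =====
def wrapB (x : Int) : Int := if x > 9 then PySem.Int.mod x 9 else x

-- 'data[R % n]' and 'base[C % m]' always hit an in-range index (0 ≤ r < n), so the
-- defaulted lookup pyGetD is exact for Python's data[R % n] here.
def expand_graph_alt (data : List (List Int)) : List (List Int) :=
  let n : Int := data.length
  (PySem.List.pyRange 0 (5 * n) 1).foldl (fun out R =>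
    let base : List Int := PySem.List.pyGetD data (PySem.Int.mod R n) []
    let m : Int := base.length
    out ++ [(PySem.List.pyRange 0 (5 * m) 1).map (fun C =>
      wrapB (wrapB (PySem.List.pyGetD base (PySem.Int.mod C m) 0 + PySem.Int.floordiv C m)
        + PySem.Int.floordiv R n))]) []

-- ===== PRECONDITION & SPEC =====
def Spec_expand_graph (data : List (List Int)) (out : List (List Int)) : Prop := out = expand_graph_alt data
instance (data : List (List Int)) (out : List (List Int)) : Decidable (Spec_expand_graph data out) := by unfold Spec_expand_graph; infer_instance

-- ===== CLAIM (what is proved, stated in full; the proofs are below) =====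
def Claim_equal_expand_graph : Prop := ∀ (data : List (List Int)), Dom_expand_graph data → Spec_expand_graph data (expand_graph data)

-- ===== LEMMAS AND PROOFS =====

-- One length-m segment of an index-arithmetic map is one tile: on [a, a+m) with a = k*m,
-- C // m = k and C % m enumerates the list.
theorem pv_seg {α β : Type} (l : List α) (d : α) (f : Int → α → β) (k a b : Int)
    (hm : 0 < l.length) (ha : a = k * (l.length : Int)) (hb : b = a + (l.length : Int)) :
    (PySem.List.pyRange a b 1).map
      (fun C => f (PySem.Int.floordiv C (l.length : Int)) (PySem.List.pyGetD l (PySem.Int.mod C (l.length : Int)) d))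
    = l.map (f k) := by
  subst hb
  rw [PySem.List.pyRange_one]
  have h1 : (a + (l.length : Int) - a).toNat = l.length := by omega
  rw [h1, List.map_map]
  apply List.ext_getElem
  · simp
  · intro u hu _
    simp only [List.getElem_map, List.getElem_range, Function.comp_apply]
    have hul : u < l.length := by simpa using hu
    have hfd : PySem.Int.floordiv (a + (u : Int)) (l.length : Int) = k := by
      rw [PySem.Int.floordiv_eq_iff_of_pos (by exact_mod_cast hm)]
      constructor
      · omega
      · have : (k + 1) * (l.length : Int) = k * l.length + l.length := by ring
        omega
    have hmod : PySem.Int.mod (a + (u : Int)) (l.length : Int) = (u : Int) := by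
      have := PySem.Int.floordiv_mul_add_mod (a + (u : Int)) (l.length : Int)
      rw [hfd] at this
      omega
    rw [hfd, hmod]
    simp [List.getD_eq_getElem?_getD, hul]

-- A 5m-long index-arithmetic map is the 5-fold tiled expansion of the list.
theorem pv_block5 {α β : Type} (l : List α) (d : α) (f : Int → α → β) :
    (PySem.List.pyRange 0 (5 * (l.length : Int)) 1).map
      (fun C => f (PySem.Int.floordiv C (l.length : Int)) (PySem.List.pyGetD l (PySem.Int.mod C (l.length : Int)) d))
    = ([0, 1, 2, 3, 4] : List Int).flatMap (fun j => l.map (f j)) := by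
  rcases Nat.eq_zero_or_pos l.length with h0 | hm
  · have : l = [] := List.eq_nil_of_length_eq_zero h0
    subst this
    simp [PySem.List.pyRange]
  · have hmi : (0 : Int) < (l.length : Int) := by exact_mod_cast hm
    have e1 := PySem.List.pyRange_one_append 0 (1 * (l.length : Int)) (5 * l.length) (by omega) (by omega)
    have e2 := PySem.List.pyRange_one_append (1 * (l.length : Int)) (2 * l.length) (5 * l.length) (by omega) (by omega)
    have e3 := PySem.List.pyRange_one_append (2 * (l.length : Int)) (3 * l.length) (5 * l.length) (by omega) (by omega)
    have e4 := PySem.List.pyRange_one_append (3 * (l.length : Int)) (4 * l.length) (5 * l.length) (by omega) (by omega)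
    rw [e1, e2, e3, e4]
    simp only [List.map_append, List.flatMap_cons, List.flatMap_nil, List.append_nil]
    rw [pv_seg l d f 0 0 (1 * l.length) hm (by ring) (by ring),
        pv_seg l d f 1 (1 * (l.length : Int)) (2 * l.length) hm (by ring) (by ring),
        pv_seg l d f 2 (2 * (l.length : Int)) (3 * l.length) hm (by ring) (by ring),
        pv_seg l d f 3 (3 * (l.length : Int)) (4 * l.length) hm (by ring) (by ring),
        pv_seg l d f 4 (4 * (l.length : Int)) (5 * l.length) hm (by ring) (by ring)]

-- ===== VERDICT (by name: the statement is the Claim_ definition above) =====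
theorem expand_graph_spec : Claim_equal_expand_graph := by
  intro data _
  unfold Spec_expand_graph
  have hB : expand_graph_alt data
      = ([0, 1, 2, 3, 4] : List Int).flatMap (fun i => data.map (fun row =>
          ([0, 1, 2, 3, 4] : List Int).flatMap (fun j => row.map (fun col => wrapB (wrapB (col + j) + i))))) := by
    unfold expand_graph_alt
    rw [show ((PySem.List.pyRange 0 (5 * (data.length : Int)) 1).foldl (fun out R =>
          out ++ [(PySem.List.pyRange 0 (5 * ((PySem.List.pyGetD data (PySem.Int.mod R (data.length : Int)) []).length : Int)) 1).map (fun C =>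
            wrapB (wrapB (PySem.List.pyGetD (PySem.List.pyGetD data (PySem.Int.mod R (data.length : Int)) []) (PySem.Int.mod C ((PySem.List.pyGetD data (PySem.Int.mod R (data.length : Int)) []).length : Int)) 0
              + PySem.Int.floordiv C ((PySem.List.pyGetD data (PySem.Int.mod R (data.length : Int)) []).length : Int))
              + PySem.Int.floordiv R (data.length : Int)))]) [])
        = (PySem.List.pyRange 0 (5 * (data.length : Int)) 1).map (fun R =>
            (fun i (row : List Int) => (PySem.List.pyRange 0 (5 * (row.length : Int)) 1).map (fun C =>
              wrapB (wrapB (PySem.List.pyGetD row (PySem.Int.mod C (row.length : Int)) 0 + PySem.Int.floordiv C (row.length : Int)) + i)))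
            (PySem.Int.floordiv R (data.length : Int)) (PySem.List.pyGetD data (PySem.Int.mod R (data.length : Int)) []))
      from by simpa using PySem.List.foldl_append_singleton_eq_map _ _ []]
    refine (pv_block5 data [] (fun i row =>
      (PySem.List.pyRange 0 (5 * (row.length : Int)) 1).map (fun C =>
        wrapB (wrapB (PySem.List.pyGetD row (PySem.Int.mod C (row.length : Int)) 0
          + PySem.Int.floordiv C (row.length : Int)) + i)))).trans ?_
    refine List.flatMap_congr ?_
    intro i _
    refine List.map_congr_left ?_
    intro row _
    exact pv_block5 row 0 (fun j col => wrapB (wrapB (col + j) + i))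
  rw [hB]
  unfold expand_graph
  have hr : PySem.List.pyRange 0 5 1 = [0, 1, 2, 3, 4] := by decide
  simp only [hr, List.foldl_cons, List.foldl_nil, List.flatMap_cons, List.flatMap_nil,
    PySem.List.foldl_append_singleton, PySem.List.foldl_append_singleton_eq_map,
    wrapB, List.cons_append, List.nil_append, List.append_nil, List.append_assoc]
  simp [Function.comp_def, List.map_map, List.map_append]
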